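-- pv_equiv track=rewrite | github.com/koba0384/uv-filter-checker | app.py | clip_ranges_to_band
-- ===== SOURCE A (Python) =====
-- def merge_ranges(ranges):
--     if not ranges:
--         return []
--     ranges = sorted(ranges, key=lambda x: x[0])
--     merged = [list(ranges[0])]
--     for start, end in ranges[1:]:
--         if start <= merged[-1][1]:
--             merged[-1][1] = max(merged[-1][1], end)
--         else:
--             merged.append([start, end])
--     return [(s, e) for s, e in merged]
--
-- def clip_ranges_to_band(ranges, band_start, band_end):
--     clipped = []
--     for start, end in ranges:
--         s = max(start, band_start)
--         e = min(end, band_end)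
--         if s < e:
--             clipped.append((s, e))
--     return merge_ranges(clipped)
-- ===== SOURCE B (Python) =====
-- def clip_ranges_to_band(ranges, band_start, band_end):
--     # Event sweep: emit (+1) at each clipped start and (-1) at each clipped end,
--     # sort events on the single key 3*x - delta (puts a start at x before an end
--     # at x, so touching intervals merge), then scan with a depth counter.
--     events = []
--     for start, end in ranges:
--         s = max(start, band_start)
--         e = min(end, band_end)
--         if s < e:
--             events.append((s, 1))
--             events.append((e, -1))
--     events.sort(key=lambda ev: 3 * ev[0] - ev[1])
--     merged = []
--     depth = 0
--     cur = 0
--     for x, delta in events: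
--         if depth == 0 and delta == 1:
--             cur = x
--         depth += delta
--         if depth == 0:
--             merged.append((cur, x))
--     return merged
-- ===== Notes on version B (the rewrite author's own statement) =====
-- stated objective: alternative
-- what changed: Replaced A's clip-then-sort-intervals-and-fold-merging-into-the-last pass by an event sweep: the clip pass emits (+1)/(-1) boundary events, they are sorted by a single integer key 3*x-delta (starts before ends at equal coordinates, so touching intervals merge), and a depth counter emits a merged interval each time the depth returns to zero.
import Mathlib
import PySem

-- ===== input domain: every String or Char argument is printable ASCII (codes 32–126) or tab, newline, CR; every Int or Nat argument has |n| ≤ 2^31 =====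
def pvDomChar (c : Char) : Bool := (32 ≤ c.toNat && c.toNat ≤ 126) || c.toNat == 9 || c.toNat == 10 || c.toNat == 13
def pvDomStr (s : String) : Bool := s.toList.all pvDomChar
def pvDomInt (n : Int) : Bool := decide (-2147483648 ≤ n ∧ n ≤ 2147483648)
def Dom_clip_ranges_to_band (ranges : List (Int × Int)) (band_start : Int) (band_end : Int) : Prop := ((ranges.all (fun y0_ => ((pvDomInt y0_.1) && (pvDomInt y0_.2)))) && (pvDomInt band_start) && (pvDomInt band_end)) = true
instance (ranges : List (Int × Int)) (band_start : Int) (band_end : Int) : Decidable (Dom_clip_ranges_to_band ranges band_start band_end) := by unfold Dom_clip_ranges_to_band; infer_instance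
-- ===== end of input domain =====

-- B replaces A's clip + sort-intervals + merge-into-last fold by a boundary-event sweep
-- (sort (+1)/(-1) events by the key 3*x-delta, scan with a depth counter); objective: alternative algorithm, same cost.

-- ===== PORT A =====
def merge_ranges (l : List (Int × Int)) : List (Int × Int) :=
  if l = [] then []
  else
    let rs := PySem.List.sorted l (fun p => p.1) false
    let merged := (rs.drop 1).foldl
      (fun m p =>
        if p.1 ≤ (m.getLast!).2 then
          m.dropLast ++ [((m.getLast!).1, max (m.getLast!).2 p.2)]
        else m ++ [p]) [rs.head!]
    merged.map (fun p => (p.1, p.2))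

def clip_ranges_to_band (ranges : List (Int × Int)) (band_start : Int) (band_end : Int) : List (Int × Int) :=
  let clipped := ranges.foldl
    (fun acc p =>
      let s := max p.1 band_start
      let e := min p.2 band_end
      if s < e then acc ++ [(s, e)] else acc) []
  merge_ranges clipped

-- ===== PORT B =====
def clip_ranges_to_band_alt (ranges : List (Int × Int)) (band_start : Int) (band_end : Int) : List (Int × Int) :=
  let events := ranges.foldl
    (fun acc p =>
      let s := max p.1 band_start
      let e := min p.2 band_end
      if s < e then acc ++ [(s, (1 : Int)), (e, (-1 : Int))] else acc) []
  let evsorted := PySem.List.sorted events (fun ev => 3 * ev.1 - ev.2) false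
  let st := evsorted.foldl
    (fun (st : Int × Int × List (Int × Int)) ev =>
      let cur := if st.1 == 0 && ev.2 == 1 then ev.1 else st.2.1
      let depth := st.1 + ev.2
      let res := if depth == 0 then st.2.2 ++ [(cur, ev.1)] else st.2.2
      (depth, cur, res)) (0, 0, [])
  st.2.2

-- ===== PRECONDITION & SPEC =====
def Spec_clip_ranges_to_band (ranges : List (Int × Int)) (band_start : Int) (band_end : Int) (out : List (Int × Int)) : Prop := out = clip_ranges_to_band_alt ranges band_start band_end
instance (ranges : List (Int × Int)) (band_start : Int) (band_end : Int) (out : List (Int × Int)) : Decidable (Spec_clip_ranges_to_band ranges band_start band_end out) := by unfold Spec_clip_ranges_to_band; infer_instance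

-- ===== CLAIM (what is proved, stated in full; the proofs are below) =====
def Claim_equal_clip_ranges_to_band : Prop := ∀ (ranges : List (Int × Int)) (band_start : Int) (band_end : Int), Dom_clip_ranges_to_band ranges band_start band_end → Spec_clip_ranges_to_band ranges band_start band_end (clip_ranges_to_band ranges band_start band_end)

-- ===== LEMMAS AND PROOFS =====

/-- The event list of an interval list: `(start, +1)` and `(end, -1)` per interval. -/
def evs (l : List (Int × Int)) : List (Int × Int) :=
  l.flatMap (fun p => [(p.1, (1 : Int)), (p.2, (-1 : Int))])

/-- B's sort key. -/
def evkey (ev : Int × Int) : Int := 3 * ev.1 - ev.2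

def esort (l : List (Int × Int)) : List (Int × Int) :=
  PySem.List.sorted (evs l) evkey false

/-- Sum of the deltas of an event list. -/
def dsum (E : List (Int × Int)) : Int := (E.map (fun ev => ev.2)).sum

/-- Recursive form of B's sweep loop. -/
def sweepRec : List (Int × Int) → Int → Int → List (Int × Int)
  | [], _, _ => []
  | ev :: t, d, c =>
    let c' := if d = 0 ∧ ev.2 = 1 then ev.1 else c
    let d' := d + ev.2
    if d' = 0 then (c', ev.1) :: sweepRec t d' c' else sweepRec t d' c'

/-- Final `cur` value of the sweep loop. -/
def fcur : List (Int × Int) → Int → Int → Int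
  | [], _, c => c
  | ev :: t, d, c => fcur t (d + ev.2) (if d = 0 ∧ ev.2 = 1 then ev.1 else c)

/-- Recursive form of A's merge loop. -/
def mergeRec : List (Int × Int) → List (Int × Int)
  | [] => []
  | [x] => [x]
  | x :: y :: t =>
    if y.1 ≤ x.2 then mergeRec ((x.1, max x.2 y.2) :: t) else x :: mergeRec (y :: t)
termination_by l => l.length
decreasing_by all_goals simp

/-- Split off the maximal overlapping group: `(group, running max end, rest)`. -/
def chainSplit : Int → List (Int × Int) → List (Int × Int) × Int × List (Int × Int)
  | m, [] => ([], m, [])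
  | m, p :: t =>
    if p.1 ≤ m then
      let r := chainSplit (max m p.2) t
      (p :: r.1, r.2.1, r.2.2)
    else ([], m, p :: t)

def chainOK : Int → List (Int × Int) → Prop
  | _, [] => True
  | m, p :: t => p.1 ≤ m ∧ chainOK (max m p.2) t

def fmax (m : Int) (g : List (Int × Int)) : Int := g.foldl (fun a p => max a p.2) m

def validI (l : List (Int × Int)) : Prop := ∀ p ∈ l, p.1 < p.2
def sortedI (l : List (Int × Int)) : Prop := l.Pairwise (fun a b => a.1 ≤ b.1)


def keyle (a b : Int × Int) : Prop := evkey a ≤ evkey b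

-- clip-stage characterisation shared by both ports
def clipL (ranges : List (Int × Int)) (bs be : Int) : List (Int × Int) :=
  ranges.filterMap (fun p =>
    if max p.1 bs < min p.2 be then some (max p.1 bs, min p.2 be) else none)

theorem foldA_clip (bs be : Int) : ∀ (l : List (Int × Int)) (acc : List (Int × Int)),
    l.foldl (fun acc p =>
      let s := max p.1 bs
      let e := min p.2 be
      if s < e then acc ++ [(s, e)] else acc) acc = acc ++ clipL l bs be := by
  intro l
  induction l with
  | nil => intro acc; simp [clipL]
  | cons p t ih =>
    intro acc
    simp only [List.foldl_cons, clipL, List.filterMap_cons]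
    by_cases h : max p.1 bs < min p.2 be
    · simp only [if_pos h, ih, List.append_assoc]; rfl
    · simp only [if_neg h, ih]; rfl

theorem foldB_clip (bs be : Int) : ∀ (l : List (Int × Int)) (acc : List (Int × Int)),
    l.foldl (fun acc p =>
      let s := max p.1 bs
      let e := min p.2 be
      if s < e then acc ++ [(s, (1 : Int)), (e, (-1 : Int))] else acc) acc
      = acc ++ evs (clipL l bs be) := by
  intro l
  induction l with
  | nil => intro acc; simp [clipL, evs]
  | cons p t ih =>
    intro acc
    simp only [List.foldl_cons, clipL, List.filterMap_cons]
    by_cases h : max p.1 bs < min p.2 be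
    · simp only [if_pos h, ih, evs, List.flatMap_cons, List.append_assoc]; rfl
    · simp only [if_neg h, ih]; rfl

theorem clip_valid (bs be : Int) (l : List (Int × Int)) : validI (clipL l bs be) := by
  intro p hp
  simp only [clipL, List.mem_filterMap] at hp
  obtain ⟨q, _, hq⟩ := hp
  split at hq
  · next h =>
    obtain rfl := Option.some.injEq _ _ ▸ hq
    simpa using h
  · simp at hq

theorem sweep_foldl : ∀ (E : List (Int × Int)) (d c : Int) (res : List (Int × Int)),
    E.foldl (fun (st : Int × Int × List (Int × Int)) ev =>
      let cur := if st.1 == 0 && ev.2 == 1 then ev.1 else st.2.1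
      let depth := st.1 + ev.2
      let res := if depth == 0 then st.2.2 ++ [(cur, ev.1)] else st.2.2
      (depth, cur, res)) (d, c, res)
    = (d + dsum E, fcur E d c, res ++ sweepRec E d c) := by
  intro E
  induction E with
  | nil => intro d c res; simp [dsum, sweepRec, fcur]
  | cons ev t ih =>
    intro d c res
    simp only [List.foldl_cons, ih, sweepRec, fcur, dsum, List.map_cons, List.sum_cons]
    by_cases hd : d = 0 ∧ ev.2 = 1
    · have h1 : (d == (0:Int) && ev.2 == (1:Int)) = true := by
        simp [hd.1, hd.2]
      rw [if_pos hd]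
      simp only [h1]
      by_cases h0 : d + ev.2 = 0
      · have : (d + ev.2 == (0:Int)) = true := by simpa using h0
        simp only [this, if_pos h0, if_true, List.append_assoc]
        exact Prod.ext (by dsimp only; ring) (Prod.ext rfl (by simp))
      · have : (d + ev.2 == (0:Int)) = false := by simpa using h0
        simp only [this, if_neg h0]
        exact Prod.ext (by dsimp only; ring) (Prod.ext rfl rfl)
    · have h1 : (d == (0:Int) && ev.2 == (1:Int)) = false := by
        rcases not_and_or.mp hd with h | h <;> simp [h]
      rw [if_neg hd]
      simp only [h1]
      by_cases h0 : d + ev.2 = 0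
      · have : (d + ev.2 == (0:Int)) = true := by simpa using h0
        simp only [this, if_pos h0, if_true, List.append_assoc]
        exact Prod.ext (by dsimp only; ring) (Prod.ext rfl (by simp))
      · have : (d + ev.2 == (0:Int)) = false := by simpa using h0
        simp only [this, if_neg h0]
        exact Prod.ext (by dsimp only; ring) (Prod.ext rfl rfl)

theorem mergeA_foldl : ∀ (l done : List (Int × Int)) (x : Int × Int),
    l.foldl (fun m p =>
        if p.1 ≤ (m.getLast!).2 then
          m.dropLast ++ [((m.getLast!).1, max (m.getLast!).2 p.2)]
        else m ++ [p]) (done ++ [x])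
    = done ++ mergeRec (x :: l) := by
  intro l
  induction l with
  | nil => intro done x; simp [mergeRec]
  | cons p t ih =>
    intro done x
    have hlast : (done ++ [x]).getLast! = x :=
      List.getLast!_of_getLast? List.getLast?_concat
    simp only [List.foldl_cons, hlast, List.dropLast_concat]
    by_cases h : p.1 ≤ x.2
    · rw [if_pos h, ih done (x.1, max x.2 p.2), mergeRec, if_pos h]
    · rw [if_neg h, ih (done ++ [x]) p, mergeRec, if_neg h]
      simp

theorem mem_evs {ev : Int × Int} {l : List (Int × Int)} (h : ev ∈ evs l) :
    ∃ p ∈ l, ev = (p.1, 1) ∨ ev = (p.2, -1) := by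
  simp only [evs, List.mem_flatMap, List.mem_cons] at h
  obtain ⟨p, hp, h⟩ := h
  exact ⟨p, hp, by simpa using h⟩

theorem snd_mem_evs {ev : Int × Int} {l : List (Int × Int)} (h : ev ∈ evs l) :
    ev.2 = 1 ∨ ev.2 = -1 := by
  obtain ⟨p, _, h | h⟩ := mem_evs h <;> subst h <;> simp

theorem evkey_inj {a b : Int × Int} (ha : a.2 = 1 ∨ a.2 = -1) (hb : b.2 = 1 ∨ b.2 = -1)
    (h : evkey a = evkey b) : a = b := by
  simp only [evkey] at h
  obtain ⟨a1, a2⟩ := a; obtain ⟨b1, b2⟩ := b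
  simp only at ha hb h ⊢
  simp only [Prod.mk.injEq]
  refine ⟨?_, ?_⟩ <;> omega

theorem sorted_uniq : ∀ (l₁ l₂ : List (Int × Int)), l₁.Perm l₂ →
    l₁.Pairwise keyle → l₂.Pairwise keyle →
    (∀ a ∈ l₁, ∀ b ∈ l₁, evkey a = evkey b → a = b) → l₁ = l₂ := by
  intro l₁
  induction l₁ with
  | nil => intro l₂ hp _ _ _; exact hp.nil_eq
  | cons a t₁ ih =>
    intro l₂ hp h1 h2 hk
    cases l₂ with
    | nil => exact absurd hp.eq_nil (by simp)
    | cons b t₂ =>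
      have hbmem : b ∈ a :: t₁ := hp.mem_iff.mpr List.mem_cons_self
      have hab : a = b := by
        have hamem : a ∈ b :: t₂ := hp.mem_iff.mp List.mem_cons_self
        rcases List.mem_cons.mp hamem with h | h
        · exact h
        · rcases List.mem_cons.mp hbmem with h' | h'
          · exact h'.symm
          · have k1 : evkey a ≤ evkey b := (List.pairwise_cons.mp h1).1 b h'
            have k2 : evkey b ≤ evkey a := (List.pairwise_cons.mp h2).1 a h
            exact hk a List.mem_cons_self b hbmem (le_antisymm k1 k2)
      subst hab
      have := ih t₂ hp.cons_inv (List.pairwise_cons.mp h1).2 (List.pairwise_cons.mp h2).2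
        (fun u hu v hv huv =>
          hk u (List.mem_cons_of_mem _ hu) v (List.mem_cons_of_mem _ hv) huv)
      rw [this]

theorem esort_pairwise (l : List (Int × Int)) : (esort l).Pairwise keyle := by
  exact PySem.List.sorted_pairwise (evs l) evkey

theorem esort_perm (l : List (Int × Int)) : (esort l).Perm (evs l) := by
  exact PySem.List.sorted_perm (evs l) evkey false

theorem evs_append (a b : List (Int × Int)) : evs (a ++ b) = evs a ++ evs b := by
  simp [evs]

theorem esort_of_perm {l₁ l₂ : List (Int × Int)} (h : l₁.Perm l₂) : esort l₁ = esort l₂ := by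
  have hperm : (evs l₁).Perm (evs l₂) :=
    List.Perm.flatMap h (fun a _ => List.Perm.refl _)
  apply sorted_uniq
  · exact ((esort_perm l₁).trans hperm).trans (esort_perm l₂).symm
  · exact esort_pairwise l₁
  · exact esort_pairwise l₂
  · intro a ha b hb hk
    exact evkey_inj (snd_mem_evs ((esort_perm l₁).mem_iff.mp ha))
      (snd_mem_evs ((esort_perm l₁).mem_iff.mp hb)) hk

theorem countP_evs_start (P : Int → Bool) (l : List (Int × Int)) :
    (evs l).countP (fun ev => ev.2 == (1 : Int) && P ev.1) = l.countP (fun p => P p.1) := by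
  induction l with
  | nil => simp [evs]
  | cons p t ih =>
    simp only [evs, List.flatMap_cons] at *
    simp [List.countP_cons, ih]

theorem countP_evs_end (P : Int → Bool) (l : List (Int × Int)) :
    (evs l).countP (fun ev => ev.2 == (-1 : Int) && P ev.1) = l.countP (fun p => P p.2) := by
  induction l with
  | nil => simp [evs]
  | cons p t ih =>
    simp only [evs, List.flatMap_cons] at *
    simp [List.countP_cons, ih]

theorem countP_split {α : Type} (p q : α → Bool) (l : List α) :
    l.countP p = l.countP (fun a => p a && q a) + l.countP (fun a => p a && !q a) := by
  induction l with
  | nil => simp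
  | cons a t ih =>
    simp only [List.countP_cons, ih]
    by_cases hp : p a <;> by_cases hq : q a <;> simp [hp, hq] <;> omega

theorem dsum_cons (ev : Int × Int) (t : List (Int × Int)) :
    dsum (ev :: t) = ev.2 + dsum t := by
  simp [dsum]

theorem dsum_eq_counts : ∀ (E : List (Int × Int)), (∀ ev ∈ E, ev.2 = 1 ∨ ev.2 = -1) →
    dsum E = (E.countP (fun ev => ev.2 == (1 : Int)) : Int)
      - (E.countP (fun ev => ev.2 == (-1 : Int)) : Int) := by
  intro E
  induction E with
  | nil => intro _; simp [dsum]
  | cons ev t ih =>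
    intro h
    have ht := ih (fun e he => h e (List.mem_cons_of_mem _ he))
    have hev := h ev List.mem_cons_self
    rcases hev with h1 | h1 <;>
      simp only [dsum_cons, ht, List.countP_cons, h1] <;> simp <;> omega

theorem dsum_evs (l : List (Int × Int)) : dsum (evs l) = 0 := by
  induction l with
  | nil => simp [dsum, evs]
  | cons p t ih =>
    have : evs (p :: t) = (p.1, 1) :: (p.2, -1) :: evs t := by simp [evs]
    rw [this, dsum_cons, dsum_cons, ih]
    ring

theorem dsum_perm {E₁ E₂ : List (Int × Int)} (h : E₁.Perm E₂) : dsum E₁ = dsum E₂ := by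
  exact List.Perm.sum_eq (List.Perm.map _ h)

theorem chainSplit_append : ∀ (t : List (Int × Int)) (m : Int),
    (chainSplit m t).1 ++ (chainSplit m t).2.2 = t := by
  intro t
  induction t with
  | nil => intro m; simp [chainSplit]
  | cons p t ih =>
    intro m
    simp only [chainSplit]
    by_cases h : p.1 ≤ m
    · simp [h, ih]
    · simp [h]

theorem chainSplit_chainOK : ∀ (t : List (Int × Int)) (m : Int), chainOK m (chainSplit m t).1 := by
  intro t
  induction t with
  | nil => intro m; simp [chainSplit, chainOK]
  | cons p t ih =>
    intro m
    simp only [chainSplit]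
    by_cases h : p.1 ≤ m
    · simp only [if_pos h]
      exact ⟨h, ih (max m p.2)⟩
    · simp [h, chainOK]

theorem chainSplit_M : ∀ (t : List (Int × Int)) (m : Int),
    (chainSplit m t).2.1 = fmax m (chainSplit m t).1 := by
  intro t
  induction t with
  | nil => intro m; simp [chainSplit, fmax]
  | cons p t ih =>
    intro m
    simp only [chainSplit]
    by_cases h : p.1 ≤ m
    · simp only [if_pos h]
      exact ih (max m p.2)
    · simp [h, fmax]

theorem chainSplit_rest : ∀ (t : List (Int × Int)) (m : Int),
    (chainSplit m t).2.2 = [] ∨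
      ∃ h r', (chainSplit m t).2.2 = h :: r' ∧ ¬ h.1 ≤ (chainSplit m t).2.1 := by
  intro t
  induction t with
  | nil => intro m; simp [chainSplit]
  | cons p t ih =>
    intro m
    simp only [chainSplit]
    by_cases h : p.1 ≤ m
    · simp only [if_pos h]
      exact ih (max m p.2)
    · simp only [if_neg h]
      right
      refine ⟨p, t, rfl, h⟩

theorem mergeRec_chain : ∀ (t : List (Int × Int)) (x : Int × Int),
    mergeRec (x :: t) = (x.1, (chainSplit x.2 t).2.1) :: mergeRec (chainSplit x.2 t).2.2 := by
  intro t
  induction t with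
  | nil => intro x; simp [chainSplit, mergeRec]
  | cons p t ih =>
    intro x
    simp only [chainSplit]
    by_cases h : p.1 ≤ x.2
    · simp only [if_pos h]
      rw [mergeRec, if_pos h]
      have := ih (x.1, max x.2 p.2)
      simpa using this
    · simp only [if_neg h]
      rw [mergeRec, if_neg h]

theorem le_fmax : ∀ (g : List (Int × Int)) (m : Int), m ≤ fmax m g := by
  intro g
  induction g with
  | nil => intro m; simp [fmax]
  | cons p t ih =>
    intro m
    simp only [fmax, List.foldl_cons]
    exact le_trans (le_max_left m p.2) (ih (max m p.2))

theorem chain_bounds : ∀ (g : List (Int × Int)) (m : Int), chainOK m g →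
    ∀ p ∈ g, p.1 ≤ fmax m g ∧ p.2 ≤ fmax m g := by
  intro g
  induction g with
  | nil => intro m _ p hp; simp at hp
  | cons q t ih =>
    intro m hc p hp
    obtain ⟨h1, h2⟩ := hc
    have hfx : fmax m (q :: t) = fmax (max m q.2) t := by simp [fmax]
    rw [hfx]
    rcases List.mem_cons.mp hp with h | hp
    · subst h
      constructor
      · exact le_trans h1 (le_trans (le_max_left _ _) (le_fmax t _))
      · exact le_trans (le_max_right m p.2) (le_fmax t _)
    · exact ih (max m q.2) h2 p hp

theorem fmax_mem : ∀ (g : List (Int × Int)) (m : Int),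
    fmax m g = m ∨ ∃ p ∈ g, fmax m g = p.2 := by
  intro g
  induction g with
  | nil => intro m; left; simp [fmax]
  | cons p t ih =>
    intro m
    have hfx : fmax m (p :: t) = fmax (max m p.2) t := by simp [fmax]
    rcases ih (max m p.2) with h | ⟨q, hq, h⟩
    · rcases le_or_gt m p.2 with hle | hlt
      · right
        exact ⟨p, List.mem_cons_self, by rw [hfx, h]; omega⟩
      · left
        rw [hfx, h]; omega
    · right
      exact ⟨q, List.mem_cons_of_mem _ hq, by rw [hfx, h]⟩

theorem chain_cover : ∀ (g : List (Int × Int)) (m x : Int), chainOK m g →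
    m ≤ x → x < fmax m g → ∃ p ∈ g, p.1 ≤ x ∧ x < p.2 := by
  intro g
  induction g with
  | nil => intro m x _ hmx hxm; simp [fmax] at hxm; omega
  | cons q t ih =>
    intro m x hc hmx hxm
    obtain ⟨h1, h2⟩ := hc
    by_cases hx : x < q.2
    · exact ⟨q, List.mem_cons_self, le_trans h1 hmx, hx⟩
    · have hfx : fmax m (q :: t) = fmax (max m q.2) t := by simp [fmax]
      obtain ⟨p, hp, hle, hlt⟩ := ih (max m q.2) x h2 (by omega) (by rw [← hfx]; exact hxm)
      exact ⟨p, List.mem_cons_of_mem _ hp, hle, hlt⟩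

theorem start_mem_evs {p : Int × Int} {l : List (Int × Int)} (h : p ∈ l) :
    (p.1, (1 : Int)) ∈ evs l := by
  simp only [evs, List.mem_flatMap]
  exact ⟨p, h, by simp⟩

theorem end_mem_evs {p : Int × Int} {l : List (Int × Int)} (h : p ∈ l) :
    (p.2, (-1 : Int)) ∈ evs l := by
  simp only [evs, List.mem_flatMap]
  exact ⟨p, h, by simp⟩

theorem headmin {y : Int × Int} {r : List (Int × Int)} (hs : sortedI (y :: r)) :
    ∀ p ∈ y :: r, y.1 ≤ p.1 := by
  intro p hp
  rcases List.mem_cons.mp hp with rfl | hp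
  · exact le_refl _
  · exact List.rel_of_pairwise_cons hs hp

theorem evs_coord_le {x : Int × Int} {g : List (Int × Int)}
    (hv : validI (x :: g)) (hc : chainOK x.2 g) :
    ∀ ev ∈ evs (x :: g), ev.1 ≤ fmax x.2 g := by
  intro ev hev
  obtain ⟨p, hp, h | h⟩ := mem_evs hev <;> subst h <;>
    rcases List.mem_cons.mp hp with h' | h'
  · rw [h']
    exact le_trans (le_of_lt (hv x List.mem_cons_self)) (le_fmax g x.2)
  · exact (chain_bounds g x.2 hc p h').1
  · rw [h']
    exact le_fmax g x.2
  · exact (chain_bounds g x.2 hc p h').2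

theorem evkey_start (a : Int) : evkey (a, 1) = 3 * a - 1 := by simp [evkey]

theorem evkey_end (a : Int) : evkey (a, -1) = 3 * a + 1 := by simp [evkey]

theorem esort_head {y : Int × Int} {r : List (Int × Int)}
    (hs : sortedI (y :: r)) (hv : validI (y :: r)) :
    ∃ rest, esort (y :: r) = (y.1, 1) :: rest := by
  have hne : esort (y :: r) ≠ [] := by
    rw [esort, Ne, PySem.List.sorted_eq_nil_iff]
    simp [evs]
  cases hL : esort (y :: r) with
  | nil => exact absurd hL hne
  | cons m rest =>
    have hm : m ∈ evs (y :: r) := (esort_perm _).mem_iff.mp (hL ▸ List.mem_cons_self)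
    have hle : evkey m ≤ evkey (y.1, 1) :=
      PySem.List.key_head_sorted_le (evs (y :: r)) evkey hL _ (start_mem_evs List.mem_cons_self)
    have hge : 3 * y.1 - 1 ≤ evkey m := by
      obtain ⟨p, hp, h | h⟩ := mem_evs hm <;> subst h
      · rw [evkey_start]
        have := headmin hs p hp
        omega
      · rw [evkey_end]
        have h1 := headmin hs p hp
        have h2 := hv p hp
        omega
    have hkey : evkey m = evkey (y.1, 1) := by rw [evkey_start] at hle ⊢; omega
    have : m = (y.1, 1) := evkey_inj (snd_mem_evs hm) (Or.inl rfl) hkey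
    exact ⟨rest, by rw [this]⟩

theorem esort_chain_last {x : Int × Int} {g : List (Int × Int)}
    (hv : validI (x :: g)) (hc : chainOK x.2 g) :
    (esort (x :: g)).getLast? = some (fmax x.2 g, -1) := by
  have hne : esort (x :: g) ≠ [] := by
    rw [esort, Ne, PySem.List.sorted_eq_nil_iff]
    simp [evs]
  have hz : (esort (x :: g)).getLast? = some ((esort (x :: g)).getLast hne) :=
    List.getLast?_eq_some_getLast hne
  rw [hz]
  congr 1
  have hzmem : (esort (x :: g)).getLast hne ∈ evs (x :: g) :=
    (esort_perm _).mem_iff.mp (List.getLast_mem hne)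
  have hMmem : (fmax x.2 g, (-1 : Int)) ∈ evs (x :: g) := by
    rcases fmax_mem g x.2 with h | ⟨p, hp, h⟩
    · rw [fmax] at h ⊢
      rw [h]
      exact end_mem_evs List.mem_cons_self
    · rw [fmax] at h ⊢
      rw [h]
      exact end_mem_evs (List.mem_cons_of_mem _ hp)
  have hup : ∀ ev ∈ evs (x :: g), evkey ev ≤ 3 * fmax x.2 g + 1 := by
    intro ev hev
    have hcle := evs_coord_le hv hc ev hev
    rcases snd_mem_evs hev with h | h
    · rw [show ev = (ev.1, ev.2) from rfl, h, evkey_start]; omega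
    · rw [show ev = (ev.1, ev.2) from rfl, h, evkey_end]; omega
  have hge : evkey (fmax x.2 g, -1) ≤ evkey ((esort (x :: g)).getLast hne) := by
    have hsplit := List.dropLast_concat_getLast hne
    have hpw : (esort (x :: g)).Pairwise keyle := esort_pairwise _
    rw [← hsplit] at hpw
    have hcross := (List.pairwise_append.mp hpw).2.2
    have : (fmax x.2 g, (-1 : Int)) ∈ esort (x :: g) := (esort_perm _).mem_iff.mpr hMmem
    rw [← hsplit] at this
    rcases List.mem_append.mp this with h | h
    · exact hcross _ h _ List.mem_cons_self
    · rw [List.mem_singleton.mp h]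
  have hkey : evkey ((esort (x :: g)).getLast hne) = evkey (fmax x.2 g, -1) := by
    have h1 := hup _ hzmem
    rw [evkey_end] at hge ⊢
    omega
  exact evkey_inj (snd_mem_evs hzmem) (Or.inr rfl) hkey

theorem chain_pos {x : Int × Int} {g : List (Int × Int)}
    (hs : sortedI (x :: g)) (hv : validI (x :: g)) (hc : chainOK x.2 g) :
    ∀ p q, p ++ q = esort (x :: g) → q ≠ [] → p ≠ [] → 0 < dsum p := by
  intro p q hpq hq hp
  rcases List.eq_nil_or_concat p with rfl | ⟨p', w, rfl⟩
  · exact absurd rfl hp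
  simp only [List.concat_eq_append] at hpq ⊢
  have hLp : ((p' ++ [w]) ++ q).Perm (evs (x :: g)) := by
    rw [hpq]; exact esort_perm _
  have hmemP : ∀ a ∈ p' ++ [w], a ∈ evs (x :: g) :=
    fun a ha => hLp.mem_iff.mp (List.mem_append.mpr (Or.inl ha))
  have hmemQ : ∀ b ∈ q, b ∈ evs (x :: g) :=
    fun b hb => hLp.mem_iff.mp (List.mem_append.mpr (Or.inr hb))
  have hpw : ((p' ++ [w]) ++ q).Pairwise keyle := by
    rw [hpq]; exact esort_pairwise _
  have hPpair := (List.pairwise_append.mp hpw).1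
  have hcross := (List.pairwise_append.mp hpw).2.2
  have hwkey : ∀ a ∈ p' ++ [w], evkey a ≤ evkey w := by
    intro a ha
    rcases List.mem_append.mp ha with h | h
    · exact (List.pairwise_append.mp hPpair).2.2 a h w List.mem_cons_self
    · rw [List.mem_singleton.mp h]
  have hwq : ∀ b ∈ q, evkey w ≤ evkey b :=
    fun b hb => hcross w (List.mem_append.mpr (Or.inr List.mem_cons_self)) b hb
  have hwm : w ∈ evs (x :: g) := hmemP w (List.mem_append.mpr (Or.inr List.mem_cons_self))
  have hds := dsum_eq_counts (p' ++ [w]) (fun a ha => snd_mem_evs (hmemP a ha))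
  have hsum : ∀ pr : (Int × Int) → Bool,
      (p' ++ [w]).countP pr + q.countP pr = (evs (x :: g)).countP pr := by
    intro pr
    rw [← List.countP_append]
    exact hLp.countP_eq pr
  rcases snd_mem_evs hwm with hw1 | hw1
  · -- last taken event is a start at w.1
    have hEbound : (p' ++ [w]).countP (fun ev => ev.2 == (-1 : Int))
        ≤ (p' ++ [w]).countP (fun ev => ev.2 == (-1 : Int) && decide (ev.1 < w.1)) := by
      apply List.countP_mono_left
      intro a ha hcond
      have ha2 : a.2 = -1 := by simpa using hcond
      have hk := hwkey a ha
      rw [evkey, evkey, ha2, hw1] at hk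
      simp only [ha2, Bool.and_eq_true, beq_iff_eq, decide_eq_true_eq]
      exact ⟨trivial, by omega⟩
    have hE2 : (p' ++ [w]).countP (fun ev => ev.2 == (-1 : Int) && decide (ev.1 < w.1))
        ≤ (x :: g).countP (fun pc => decide (pc.2 < w.1)) := by
      have h1 := hsum (fun ev => ev.2 == (-1 : Int) && decide (ev.1 < w.1))
      rw [countP_evs_end (fun a => decide (a < w.1)) (x :: g)] at h1
      omega
    have hSq : q.countP (fun ev => ev.2 == (1 : Int) && decide (ev.1 < w.1)) = 0 := by
      rw [List.countP_eq_zero]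
      intro b hb hcond
      obtain ⟨hb2, hblt⟩ : b.2 = 1 ∧ b.1 < w.1 := by simpa using hcond
      have hk := hwq b hb
      rw [evkey, evkey, hb2, hw1] at hk
      omega
    have hS1 : (p' ++ [w]).countP (fun ev => ev.2 == (1 : Int) && decide (ev.1 < w.1))
        = (x :: g).countP (fun pc => decide (pc.1 < w.1)) := by
      have h1 := hsum (fun ev => ev.2 == (1 : Int) && decide (ev.1 < w.1))
      rw [countP_evs_start (fun a => decide (a < w.1)) (x :: g)] at h1
      omega
    have hmono : (x :: g).countP (fun pc => decide (pc.2 < w.1))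
        ≤ (x :: g).countP (fun pc => decide (pc.1 < w.1)) := by
      apply List.countP_mono_left
      intro pc hpc hcond
      have := hv pc hpc
      simp only [decide_eq_true_eq] at hcond ⊢
      omega
    have hsplitS := countP_split (fun ev => ev.2 == (1 : Int))
      (fun ev => decide (ev.1 < w.1)) (p' ++ [w])
    have hwitness : 0 < (p' ++ [w]).countP
        (fun ev => ev.2 == (1 : Int) && !(decide (ev.1 < w.1))) := by
      rw [List.countP_pos_iff]
      exact ⟨w, List.mem_append.mpr (Or.inr List.mem_cons_self), by simp [hw1]⟩
    rw [hds]
    omega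
  · -- last taken event is an end at w.1
    have hEbound : (p' ++ [w]).countP (fun ev => ev.2 == (-1 : Int))
        ≤ (p' ++ [w]).countP (fun ev => ev.2 == (-1 : Int) && decide (ev.1 ≤ w.1)) := by
      apply List.countP_mono_left
      intro a ha hcond
      have ha2 : a.2 = -1 := by simpa using hcond
      have hk := hwkey a ha
      rw [evkey, evkey, ha2, hw1] at hk
      simp only [ha2, Bool.and_eq_true, beq_iff_eq, decide_eq_true_eq]
      exact ⟨trivial, by omega⟩
    have hSq : q.countP (fun ev => ev.2 == (1 : Int) && decide (ev.1 ≤ w.1)) = 0 := by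
      rw [List.countP_eq_zero]
      intro b hb hcond
      obtain ⟨hb2, hble⟩ : b.2 = 1 ∧ b.1 ≤ w.1 := by simpa using hcond
      have hk := hwq b hb
      rw [evkey, evkey, hb2, hw1] at hk
      omega
    have hS1 : (p' ++ [w]).countP (fun ev => ev.2 == (1 : Int) && decide (ev.1 ≤ w.1))
        = (x :: g).countP (fun pc => decide (pc.1 ≤ w.1)) := by
      have h1 := hsum (fun ev => ev.2 == (1 : Int) && decide (ev.1 ≤ w.1))
      rw [countP_evs_start (fun a => decide (a ≤ w.1)) (x :: g)] at h1
      omega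
    have hSle : (p' ++ [w]).countP (fun ev => ev.2 == (1 : Int) && decide (ev.1 ≤ w.1))
        ≤ (p' ++ [w]).countP (fun ev => ev.2 == (1 : Int)) := by
      apply List.countP_mono_left
      intro a _ hcond
      simp only [Bool.and_eq_true] at hcond
      exact hcond.1
    have hJ := hsum (fun ev => ev.2 == (-1 : Int) && decide (ev.1 ≤ w.1))
    rw [countP_evs_end (fun a => decide (a ≤ w.1)) (x :: g)] at hJ
    by_cases hq0 : q.countP (fun ev => ev.2 == (-1 : Int) && decide (ev.1 ≤ w.1)) = 0
    · -- all remaining events lie strictly beyond w.1: w.1 is properly covered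
      have hqgt : ∀ b ∈ q, w.1 < b.1 := by
        intro b hb
        rcases snd_mem_evs (hmemQ b hb) with hb2 | hb2
        · have hk := hwq b hb
          rw [evkey, evkey, hb2, hw1] at hk
          omega
        · by_contra hle
          rw [List.countP_eq_zero] at hq0
          exact hq0 b hb (by simp only [hb2, Bool.and_eq_true, beq_iff_eq,
            decide_eq_true_eq]; exact ⟨trivial, by omega⟩)
      obtain ⟨b0, q', rfl⟩ : ∃ b0 q', q = b0 :: q' := by
        cases q with
        | nil => exact absurd rfl hq
        | cons a b => exact ⟨a, b, rfl⟩
      have hb0 := hqgt b0 List.mem_cons_self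
      have hb0M : b0.1 ≤ fmax x.2 g :=
        evs_coord_le hv hc b0 (hmemQ b0 List.mem_cons_self)
      obtain ⟨pw, hpwm, hpe | hpe⟩ := mem_evs hwm
      · rw [hpe] at hw1; simp at hw1
      · have hx1 : x.1 ≤ w.1 := by
          have h1 := headmin hs pw hpwm
          have h2 := hv pw hpwm
          rw [hpe]
          simp only
          omega
        have hcov : ∃ pc ∈ x :: g, pc.1 ≤ w.1 ∧ w.1 < pc.2 := by
          by_cases hxc : w.1 < x.2
          · exact ⟨x, List.mem_cons_self, hx1, hxc⟩
          · obtain ⟨pc, hpc, h1, h2⟩ := chain_cover g x.2 w.1 hc (by omega) (by omega)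
            exact ⟨pc, List.mem_cons_of_mem _ hpc, h1, h2⟩
        obtain ⟨pc, hpcm, hpc1, hpc2⟩ := hcov
        have hsplitC := countP_split (fun pc => decide (pc.1 ≤ w.1))
          (fun pc => decide (pc.2 ≤ w.1)) (x :: g)
        have hconj : (x :: g).countP (fun pc => decide (pc.1 ≤ w.1) && decide (pc.2 ≤ w.1))
            = (x :: g).countP (fun pc => decide (pc.2 ≤ w.1)) := by
          apply List.countP_congr
          intro a ha
          have := hv a ha
          simp only [Bool.and_eq_true, decide_eq_true_eq]
          constructor
          · exact fun h => h.2
          · exact fun h => ⟨by omega, h⟩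
        have hwit : 0 < (x :: g).countP
            (fun pc => decide (pc.1 ≤ w.1) && !decide (pc.2 ≤ w.1)) := by
          rw [List.countP_pos_iff]
          refine ⟨pc, hpcm, ?_⟩
          simp only [Bool.and_eq_true, decide_eq_true_eq, Bool.not_eq_eq_eq_not,
            Bool.not_true, decide_eq_false_iff_not]
          exact ⟨hpc1, by omega⟩
        rw [hds]
        omega
    · -- some end at coordinate ≤ w.1 is still unprocessed
      have hmono2 : (x :: g).countP (fun pc => decide (pc.2 ≤ w.1))
          ≤ (x :: g).countP (fun pc => decide (pc.1 ≤ w.1)) := by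
        apply List.countP_mono_left
        intro pc hpc hcond
        have := hv pc hpc
        simp only [decide_eq_true_eq] at hcond ⊢
        omega
      rw [hds]
      omega

theorem sweep_append : ∀ (E1 E2 : List (Int × Int)) (d c : Int),
    sweepRec (E1 ++ E2) d c = sweepRec E1 d c ++ sweepRec E2 (d + dsum E1) (fcur E1 d c) := by
  intro E1
  induction E1 with
  | nil => intro E2 d c; simp [sweepRec, dsum, fcur]
  | cons ev t ih =>
    intro E2 d c
    simp only [List.cons_append, sweepRec, fcur, dsum, List.map_cons, List.sum_cons]
    by_cases h0 : d + ev.2 = 0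
    · simp only [if_pos h0, List.cons_append, ih]
      have : d + (ev.2 + (t.map (fun ev => ev.2)).sum) = d + ev.2 + dsum t := by
        simp [dsum]; ring
      rw [this]
    · simp only [if_neg h0, ih]
      have : d + (ev.2 + (t.map (fun ev => ev.2)).sum) = d + ev.2 + dsum t := by
        simp [dsum]; ring
      rw [this]

theorem sweep_cur (x : Int) (t : List (Int × Int)) (c c' : Int) :
    sweepRec ((x, 1) :: t) 0 c = sweepRec ((x, 1) :: t) 0 c' := by
  simp [sweepRec]

theorem sweep_pos : ∀ (E : List (Int × Int)) (d c : Int) (z : Int × Int), 0 < d →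
    (∀ p q, p ++ q = E → q ≠ [] → 0 < d + dsum p) → d + dsum E = 0 →
    E.getLast? = some z → sweepRec E d c = [(c, z.1)] := by
  intro E
  induction E with
  | nil => intro d c z hd _ htot _; exfalso; simp [dsum] at htot; omega
  | cons ev t ih =>
    intro d c z hd hpre htot hlast
    have hc' : ¬ (d = 0 ∧ ev.2 = 1) := by omega
    rw [sweepRec]
    simp only [if_neg hc']
    match t, ih with
    | [], _ =>
      have hz : z = ev := by
        have := hlast
        simp only [List.getLast?_singleton] at this
        exact (Option.some.injEq _ _ ▸ this.symm)
      have h0 : d + ev.2 = 0 := by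
        rw [dsum_cons] at htot; simp [dsum] at htot; omega
      subst hz
      simp only [if_pos h0, sweepRec]
    | t0 :: t1, ih =>
      have hpos : 0 < d + ev.2 := by
        have h := hpre [ev] (t0 :: t1) rfl (by simp)
        rw [dsum_cons] at h
        simp [dsum] at h
        omega
      have h0 : ¬ (d + ev.2 = 0) := by omega
      simp only [if_neg h0]
      apply ih (d + ev.2) c z hpos
      · intro p q hpq hq
        have := hpre (ev :: p) q (by rw [← hpq]; rfl) hq
        rw [dsum_cons] at this
        omega
      · rw [dsum_cons] at htot; omega
      · rwa [List.getLast?_cons_cons] at hlast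

theorem chain_sweep {x : Int × Int} {g : List (Int × Int)}
    (hs : sortedI (x :: g)) (hv : validI (x :: g)) (hc : chainOK x.2 g) :
    sweepRec (esort (x :: g)) 0 0 = [(x.1, fmax x.2 g)] := by
  obtain ⟨rest, hL⟩ := esort_head hs hv
  have hlast := esort_chain_last hv hc
  rw [hL] at hlast ⊢
  have hstep : sweepRec ((x.1, 1) :: rest) 0 0 = sweepRec rest 1 x.1 := by
    rw [sweepRec]
    norm_num
  rw [hstep]
  cases rest with
  | nil => simp at hlast
  | cons r0 r1 =>
    rw [List.getLast?_cons_cons] at hlast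
    have htot : 1 + dsum (r0 :: r1) = 0 := by
      have h1 : dsum ((x.1, 1) :: r0 :: r1) = dsum (evs (x :: g)) :=
        dsum_perm (hL ▸ esort_perm (x :: g))
      rw [dsum_evs] at h1
      rw [dsum_cons] at h1
      simpa using h1
    rw [sweep_pos (r0 :: r1) 1 x.1 (fmax x.2 g, -1) (by norm_num) ?_ htot hlast]
    intro p q hpq hq
    have hp := chain_pos hs hv hc ((x.1, 1) :: p) q (by rw [hL, ← hpq]; rfl) hq (by simp)
    rw [dsum_cons] at hp
    simpa using hp

theorem esort_split {x : Int × Int} {g r : List (Int × Int)} {M : Int}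
    (hg : ∀ ev ∈ evs (x :: g), ev.1 ≤ M) (hr : ∀ ev ∈ evs r, M < ev.1) :
    esort (x :: (g ++ r)) = esort (x :: g) ++ esort r := by
  have e1 : evs (x :: (g ++ r)) = evs (x :: g) ++ evs r := by
    rw [← List.cons_append, evs_append]
  have cross : ∀ a ∈ esort (x :: g), ∀ b ∈ esort r, keyle a b := by
    intro a ha b hb
    have ha' : a ∈ evs (x :: g) := (esort_perm _).mem_iff.mp ha
    have hb' : b ∈ evs r := (esort_perm _).mem_iff.mp hb
    have h1 := hg a ha'
    have h2 := hr b hb'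
    have h3 := snd_mem_evs ha'
    have h4 := snd_mem_evs hb'
    show evkey a ≤ evkey b
    rw [evkey, evkey]
    omega
  apply Eq.symm
  apply sorted_uniq
  · refine (((esort_perm _).append (esort_perm r)).trans ?_)
    rw [← e1]
    exact (esort_perm _).symm
  · exact List.pairwise_append.mpr ⟨esort_pairwise _, esort_pairwise _, cross⟩
  · exact esort_pairwise _
  · intro a ha b hb hk
    have hmem : ∀ c ∈ esort (x :: g) ++ esort r, c ∈ evs (x :: (g ++ r)) := by
      intro c hc
      rw [e1]
      rcases List.mem_append.mp hc with h | h
      · exact List.mem_append.mpr (Or.inl ((esort_perm _).mem_iff.mp h))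
      · exact List.mem_append.mpr (Or.inr ((esort_perm _).mem_iff.mp h))
    exact evkey_inj (snd_mem_evs (hmem a ha)) (snd_mem_evs (hmem b hb)) hk

theorem esort_nil : esort [] = [] := by
  rw [esort]
  apply (PySem.List.sorted_eq_nil_iff _ _ _).mpr
  rfl

theorem main_equiv : ∀ (n : Nat) (C : List (Int × Int)), C.length ≤ n →
    sortedI C → validI C → sweepRec (esort C) 0 0 = mergeRec C := by
  intro n
  induction n with
  | zero =>
    intro C hlen _ _
    have : C = [] := List.length_eq_zero_iff.mp (Nat.le_zero.mp hlen)
    subst this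
    rw [esort_nil]
    simp [sweepRec, mergeRec]
  | succ n ih =>
    intro C hlen hs hv
    cases C with
    | nil =>
      rw [esort_nil]
      simp [sweepRec, mergeRec]
    | cons x t =>
      rcases h : chainSplit x.2 t with ⟨g, M, r⟩
      have ht : g ++ r = t := by
        have := chainSplit_append t x.2
        rw [h] at this
        exact this
      have hcg : chainOK x.2 g := by
        have := chainSplit_chainOK t x.2
        rw [h] at this
        exact this
      have hM : M = fmax x.2 g := by
        have := chainSplit_M t x.2
        rw [h] at this
        exact this
      have hrestc := chainSplit_rest t x.2
      rw [h] at hrestc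
      simp only at hrestc ht hcg hM
      have sxg : sortedI (x :: g) := by
        apply List.Pairwise.sublist _ hs
        rw [← ht]
        exact List.Sublist.cons₂ x (List.sublist_append_left g r)
      have sr : sortedI r := by
        apply List.Pairwise.sublist _ hs
        rw [← ht]
        exact (List.sublist_append_right g r).trans (List.sublist_cons_self _ _)
      have vxg : validI (x :: g) := by
        intro p hp
        apply hv
        rcases List.mem_cons.mp hp with rfl | hp
        · exact List.mem_cons_self
        · exact List.mem_cons_of_mem _ (ht ▸ List.mem_append.mpr (Or.inl hp))
      have vr : validI r := by
        intro p hp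
        exact hv p (List.mem_cons_of_mem _ (ht ▸ List.mem_append.mpr (Or.inr hp)))
      have hr : ∀ ev ∈ evs r, M < ev.1 := by
        rcases hrestc with hre | ⟨h0, r', hre, hgt⟩
        · rw [hre]; intro ev hev; simp [evs] at hev
        · subst hre
          intro ev hev
          obtain ⟨p, hp, he | he⟩ := mem_evs hev <;> subst he
          · have h1 := headmin sr p hp
            simp only at h1 ⊢
            omega
          · have h1 := headmin sr p hp
            have h2 := vr p hp
            simp only at h1 ⊢
            omega
      have hsplit : esort (x :: t) = esort (x :: g) ++ esort r := by
        rw [← ht]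
        exact esort_split (hM ▸ evs_coord_le vxg hcg) hr
      have hd0 : dsum (esort (x :: g)) = 0 := by
        rw [dsum_perm (esort_perm _), dsum_evs]
      have hlr : r.length ≤ n := by
        have : g.length + r.length = t.length := by
          rw [← ht, List.length_append]
        simp only [List.length_cons] at hlen
        omega
      have hcur : ∀ c : Int, sweepRec (esort r) 0 c = sweepRec (esort r) 0 0 := by
        intro c
        cases r with
        | nil => rw [esort_nil]; simp [sweepRec]
        | cons y r' =>
          obtain ⟨rest, hLr⟩ := esort_head sr vr
          rw [hLr, sweep_cur y.1 rest c 0]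
      rw [hsplit, sweep_append, chain_sweep sxg vxg hcg, hd0]
      norm_num
      rw [hcur, ih r hlr sr vr, mergeRec_chain t x, h, hM]

-- ===== VERDICT (by name: the statement is the Claim_ definition above) =====
theorem clip_ranges_to_band_spec : Claim_equal_clip_ranges_to_band := by
  intro ranges bs be _
  show clip_ranges_to_band ranges bs be = clip_ranges_to_band_alt ranges bs be
  have hB : clip_ranges_to_band_alt ranges bs be = sweepRec (esort (clipL ranges bs be)) 0 0 := by
    rw [clip_ranges_to_band_alt]
    simp only [foldB_clip, List.nil_append, sweep_foldl]
    rfl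
  have hvc : validI (clipL ranges bs be) := clip_valid bs be ranges
  have hA : clip_ranges_to_band ranges bs be
      = merge_ranges (clipL ranges bs be) := by
    rw [clip_ranges_to_band]
    simp only [foldA_clip, List.nil_append]
  rw [hA, hB]
  rw [esort_of_perm (PySem.List.sorted_perm (clipL ranges bs be) (fun p => p.1) false).symm]
  rw [merge_ranges]
  by_cases hC : clipL ranges bs be = []
  · rw [if_pos hC]
    have : PySem.List.sorted (clipL ranges bs be) (fun p => p.1) false = [] := by
      rw [PySem.List.sorted_eq_nil_iff]
      exact hC
    rw [this, esort_nil]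
    rfl
  · rw [if_neg hC]
    have hrsne : PySem.List.sorted (clipL ranges bs be) (fun p => p.1) false ≠ [] := by
      rw [Ne, PySem.List.sorted_eq_nil_iff]
      exact hC
    cases hrs : PySem.List.sorted (clipL ranges bs be) (fun p => p.1) false with
    | nil => exact absurd hrs hrsne
    | cons c0 crest =>
      have hmrg : crest.foldl (fun m p =>
          if p.1 ≤ (m.getLast!).2 then
            m.dropLast ++ [((m.getLast!).1, max (m.getLast!).2 p.2)]
          else m ++ [p]) [c0] = mergeRec (c0 :: crest) := by
        have := mergeA_foldl crest [] c0
        simpa using this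
      have hsI : sortedI (c0 :: crest) := by
        rw [← hrs]
        exact PySem.List.sorted_pairwise _ _
      have hvI : validI (c0 :: crest) := by
        intro p hp
        apply hvc
        rw [← PySem.List.mem_sorted (xs := clipL ranges bs be) (key := fun p => p.1) (rev := false)]
        rw [hrs]
        exact hp
      have hmap : ∀ l : List (Int × Int), l.map (fun p => (p.1, p.2)) = l := by
        intro l
        simp
      simp only [List.drop_one, List.tail_cons, List.head!_cons, hmrg, hmap]
      exact (main_equiv (c0 :: crest).length (c0 :: crest) le_rfl hsI hvI).symm
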